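-- pv_equiv track=rewrite | github.com/isndotbiz/ged | tools/cli/gedfix/fix_non_date.py | _fix_indi_record
-- ===== SOURCE A (Python) =====
-- def _fix_indi_record(rec: list[str], approve_dup_facts: bool, approve_suffix: bool, note_prefix: str) -> list[str]:
--     # Remove duplicate BIRT/DEAT events with identical subtrees (DATE/PLAC text-equal)
--     # Move suffix tokens from NAME GIVN/SURN into NSFX if approve_suffix=True
--     # Keep structure otherwise intact
--     out = []
--     # first line:
--     out.append(" ".join(rec[0].strip().split()))
--     i=1
--     # Collect NAME blocks to possibly adjust NSFX
--     while i < len(rec):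
--         line = " ".join(rec[i].strip().split())
--         parts = line.split(" ", 2)
--         if len(parts)>=2 and parts[0]=="1" and parts[1] in ("BIRT","DEAT","CHR","BAPM"):
--             # capture block
--             k = i+1
--             block = [line]
--             while k < len(rec):
--                 nxt = rec[k]
--                 if nxt.strip() and int(nxt.split(" ",1)[0]) <= 1:
--                     break
--                 block.append(" ".join(nxt.strip().split()))
--                 k += 1
--             # decide dedupe later
--             out.append(("EVENT_BLOCK", block))
--             i = k
--             continue
--         elif len(parts)>=2 and parts[0]=="1" and parts[1]=="NAME":
--             # capture NAME subtree
--             k = i+1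
--             block = [line]
--             while k < len(rec):
--                 if rec[k].strip() and int(rec[k].split(" ",1)[0]) <= 1:
--                     break
--                 block.append(" ".join(rec[k].strip().split()))
--                 k += 1
--             if approve_suffix:
--                 block = _move_suffix_to_nsfx(block, note_prefix)
--             out.append(("NAME_BLOCK", block))
--             i = k
--             continue
--         else:
--             out.append(line)
--             i += 1
--     # Now collapse duplicate EVENT_BLOCKs if exact (byte-identical)
--     final: list[str] = []
--     final.append(out[0])  # header line
--     seen_blocks = set()
--     for item in out[1:]:
--         if isinstance(item, tuple) and item[0] == "EVENT_BLOCK":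
--             block = item[1]
--             sig = "\n".join(block)
--             if sig in seen_blocks and approve_dup_facts:
--                 final.append(f"1 NOTE {note_prefix} Removed duplicate event block")
--                 continue
--             seen_blocks.add(sig)
--             final.extend(block)
--         elif isinstance(item, tuple) and item[0] == "NAME_BLOCK":
--             final.extend(item[1])
--         else:
--             final.append(item)
--     return final
--
-- def _move_suffix_to_nsfx(name_block: list[str], note_prefix: str) -> list[str]:
--     # If NAME has suffix tokens like "II" or "Jr" at end of GIVN or SURN, move to NSFX (add 2 NSFX)
--     # Conservative: only move if NSFX not already present.
--     SUF = {"JR","SR","II","III","IV","V","VI","VII","VIII","IX","X","ESQ"}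
--     givn=""; surn=""; has_nsfx=False
--     for ln in name_block[1:]:
--         if ln.startswith("2 GIVN "): givn = ln[7:].strip()
--         if ln.startswith("2 SURN "): surn = ln[7:].strip()
--         if ln.startswith("2 NSFX "): has_nsfx=True
--     if has_nsfx:
--         return name_block
--     # extract suffix if last token matches
--     moved = None
--     tokens = (givn.split() + surn.split())[::-1]
--     for t in tokens:
--         up = t.strip(",. ").upper()
--         if up in SUF:
--             moved = t.strip(",. ")
--             break
--     if not moved:
--         return name_block
--     # add 2 NSFX if not present, and remove from the end of corresponding field (display-only; leave 1 NAME raw as-is)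
--     out=[]
--     out.append(name_block[0])
--     for ln in name_block[1:]:
--         if ln.startswith("2 GIVN ") and givn.endswith(" "+moved):
--             new = "2 GIVN " + givn[:-(len(moved)+1)]
--             out.append(new)
--             continue
--         if ln.startswith("2 SURN ") and surn.endswith(" "+moved):
--             new = "2 SURN " + surn[:-(len(moved)+1)]
--             out.append(new)
--             continue
--         out.append(ln)
--     out.append(f"2 NSFX {moved}")
--     out.append(f"2 NOTE {note_prefix} Moved suffix '{moved}' to NSFX")
--     return out
-- ===== SOURCE B (Python) =====
-- def _fix_indi_record(rec: list[str], approve_dup_facts: bool, approve_suffix: bool, note_prefix: str) -> list[str]: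
--     # Single fused pass: normalize, capture event/NAME subtrees in place, dedupe events as we go.
--     norm = lambda s: " ".join(s.strip().split())
--
--     def boundary(x: str) -> bool:
--         return bool(x.strip()) and int(x.split(" ", 1)[0]) <= 1
--
--     out = [norm(rec[0])]
--     seen: set[str] = set()
--     i = 1
--     n = len(rec)
--     while i < n:
--         line = norm(rec[i])
--         parts = line.split(" ", 2)
--         tag = parts[1] if len(parts) >= 2 and parts[0] == "1" else None
--         if tag in ("BIRT", "DEAT", "CHR", "BAPM"):
--             rest = rec[i + 1:]
--             j = next((ix for ix, x in enumerate(rest) if boundary(x)), len(rest))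
--             block = [line] + [norm(x) for x in rest[:j]]
--             sig = "\n".join(block)
--             if sig in seen and approve_dup_facts:
--                 out.append(f"1 NOTE {note_prefix} Removed duplicate event block")
--             else:
--                 seen.add(sig)
--                 out.extend(block)
--             i += 1 + j
--         elif tag == "NAME":
--             rest = rec[i + 1:]
--             j = next((ix for ix, x in enumerate(rest) if boundary(x)), len(rest))
--             block = [line] + [norm(x) for x in rest[:j]]
--             if approve_suffix:
--                 block = _move_suffix_to_nsfx(block, note_prefix)
--             out.extend(block)
--             i += 1 + j
--         else:
--             out.append(line)
--             i += 1
--     return out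
--
--
-- def _move_suffix_to_nsfx(name_block: list[str], note_prefix: str) -> list[str]:
--     SUF = {"JR","SR","II","III","IV","V","VI","VII","VIII","IX","X","ESQ"}
--     givn=""; surn=""; has_nsfx=False
--     for ln in name_block[1:]:
--         if ln.startswith("2 GIVN "): givn = ln[7:].strip()
--         if ln.startswith("2 SURN "): surn = ln[7:].strip()
--         if ln.startswith("2 NSFX "): has_nsfx=True
--     if has_nsfx:
--         return name_block
--     moved = None
--     tokens = (givn.split() + surn.split())[::-1]
--     for t in tokens:
--         up = t.strip(",. ").upper()
--         if up in SUF: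
--             moved = t.strip(",. ")
--             break
--     if not moved:
--         return name_block
--     out=[]
--     out.append(name_block[0])
--     for ln in name_block[1:]:
--         if ln.startswith("2 GIVN ") and givn.endswith(" "+moved):
--             out.append("2 GIVN " + givn[:-(len(moved)+1)])
--             continue
--         if ln.startswith("2 SURN ") and surn.endswith(" "+moved):
--             out.append("2 SURN " + surn[:-(len(moved)+1)])
--             continue
--         out.append(ln)
--     out.append(f"2 NSFX {moved}")
--     out.append(f"2 NOTE {note_prefix} Moved suffix '{moved}' to NSFX")
--     return out
-- ===== Notes on version B (the rewrite author's own statement) =====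
-- stated objective: simpler
-- what changed: Replaces A's two-pass design (first build a tagged intermediate list of strings and ('EVENT_BLOCK'/'NAME_BLOCK', block) tuples, then re-scan it with isinstance dispatch to dedupe) by one fused pass that normalizes, captures each level-1 BIRT/DEAT/CHR/BAPM or NAME subtree via a generator-computed boundary index plus a slice comprehension, and dedupes event blocks immediately against the seen-set, eliminating the intermediate tagged list entirely.
import Mathlib
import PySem

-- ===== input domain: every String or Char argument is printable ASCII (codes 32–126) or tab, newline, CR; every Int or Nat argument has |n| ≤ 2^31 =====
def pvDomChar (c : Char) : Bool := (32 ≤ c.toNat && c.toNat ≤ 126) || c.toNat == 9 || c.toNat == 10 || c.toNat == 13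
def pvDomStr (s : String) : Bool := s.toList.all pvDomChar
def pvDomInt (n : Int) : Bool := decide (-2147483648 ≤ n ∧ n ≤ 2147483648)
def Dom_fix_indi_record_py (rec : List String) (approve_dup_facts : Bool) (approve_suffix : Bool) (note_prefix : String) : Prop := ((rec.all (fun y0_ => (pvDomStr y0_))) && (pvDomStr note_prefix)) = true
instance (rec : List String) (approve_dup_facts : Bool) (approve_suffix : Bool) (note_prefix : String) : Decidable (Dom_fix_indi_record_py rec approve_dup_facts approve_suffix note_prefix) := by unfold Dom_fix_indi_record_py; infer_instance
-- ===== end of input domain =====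

-- B fuses A's two passes (tagged intermediate list + re-scan) into one pass that captures and
-- dedupes each event block in place; objective: simpler.


-- ===== PORT A =====
-- shared helpers (the same expressions occur verbatim in both Python sources)

-- " ".join(s.strip().split())
def pvNorm (s : String) : String := PySem.Str.join " " (PySem.Str.split₀ (PySem.Str.strip s))

-- s.split(" ", 1)[0]  (sep ≠ "" so split returns at least one piece)
def pvFirstTok (s : String) : String := ((PySem.Str.splitMax? s " " 1).getD []).headD ""

-- `nxt.strip() and int(nxt.split(" ",1)[0]) <= 1`; where int() raises (none) we break —
-- Pre_ excludes those inputs, so the branch is never taken on admitted inputs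
def pvBoundary (s : String) : Bool :=
  (PySem.Str.strip s != "") &&
    (match PySem.Int.ofStr? (pvFirstTok s) with
     | none => true
     | some v => decide (v ≤ 1))

-- parts = line.split(" ", 2); len(parts)>=2 and parts[0]=="1" and parts[1] in (...)
def pvTag (line : String) : Option String :=
  match (PySem.Str.splitMax? line " " 2).getD [] with
  | p0 :: p1 :: _ => if p0 == "1" then some p1 else none
  | _ => none

def pvIsEvent (line : String) : Bool :=
  match pvTag line with
  | some t => t == "BIRT" || t == "DEAT" || t == "CHR" || t == "BAPM"
  | none => false

def pvIsName (line : String) : Bool :=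
  match pvTag line with
  | some t => t == "NAME"
  | none => false

def pvSUF : List String := ["JR","SR","II","III","IV","V","VI","VII","VIII","IX","X","ESQ"]

-- _move_suffix_to_nsfx (identical helper in both Python files)
def pvMoveSuffix (name_block : List String) (note_prefix : String) : List String :=
  let st := name_block.tail.foldl (fun (st : String × String × Bool) ln =>
      let st := if PySem.Str.startswith ln "2 GIVN " then
          (PySem.Str.strip (PySem.Str.slice ln (some 7) none), st.2.1, st.2.2) else st
      let st := if PySem.Str.startswith ln "2 SURN " then
          (st.1, PySem.Str.strip (PySem.Str.slice ln (some 7) none), st.2.2) else st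
      if PySem.Str.startswith ln "2 NSFX " then (st.1, st.2.1, true) else st)
    ("", "", false)
  let givn := st.1
  let surn := st.2.1
  let has_nsfx := st.2.2
  if has_nsfx then name_block
  else
    let tokens := (PySem.Str.split₀ givn ++ PySem.Str.split₀ surn).reverse
    let moved? := tokens.findSome? (fun t =>
      let c := PySem.Str.stripChars t ",. "
      if pvSUF.contains (PySem.Str.upper c) then some c else none)
    match moved? with
    | none => name_block
    | some moved =>
      (name_block.headD "") ::
        (name_block.tail.map (fun ln =>
          if PySem.Str.startswith ln "2 GIVN " && PySem.Str.endswith givn (" " ++ moved) then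
            "2 GIVN " ++ (PySem.Str.slice givn none (some (-(PySem.Str.len moved) - 1)))
          else if PySem.Str.startswith ln "2 SURN " && PySem.Str.endswith surn (" " ++ moved) then
            "2 SURN " ++ (PySem.Str.slice surn none (some (-(PySem.Str.len moved) - 1)))
          else ln))
        ++ ["2 NSFX " ++ moved,
            "2 NOTE " ++ note_prefix ++ " Moved suffix '" ++ moved ++ "' to NSFX"]

-- A's inner `while k < len(rec)` block-capture loop, accumulator style
def pvCaptureA : List String → List String → (List String × List String)
  | [], acc => (acc.reverse, [])
  | x :: xs, acc =>
      if pvBoundary x then (acc.reverse, x :: xs)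
      else pvCaptureA xs (pvNorm x :: acc)

theorem pvCaptureA_snd_len (xs acc : List String) : (pvCaptureA xs acc).2.length ≤ xs.length := by
  induction xs generalizing acc with
  | nil => simp [pvCaptureA]
  | cons x xs ih =>
      by_cases h : pvBoundary x = true <;> simp [pvCaptureA, h]
      exact Nat.le_succ_of_le (ih _)

-- A's intermediate tagged list: plain lines, ("EVENT_BLOCK", b), ("NAME_BLOCK", b)
inductive PvItem where
  | line (s : String)
  | event (b : List String)
  | name (b : List String)
deriving Repr, DecidableEq

-- A's first while loop (from i = 1 on)
def pvPass1 (xs : List String) (approve_suffix : Bool) (note_prefix : String) : List PvItem :=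
  match xs with
  | [] => []
  | r :: rest =>
    let line := pvNorm r
    if pvIsEvent line then
      PvItem.event (pvCaptureA rest [line]).1 ::
        pvPass1 (pvCaptureA rest [line]).2 approve_suffix note_prefix
    else if pvIsName line then
      PvItem.name (if approve_suffix then pvMoveSuffix (pvCaptureA rest [line]).1 note_prefix
                   else (pvCaptureA rest [line]).1) ::
        pvPass1 (pvCaptureA rest [line]).2 approve_suffix note_prefix
    else
      PvItem.line line :: pvPass1 rest approve_suffix note_prefix
termination_by xs.length
decreasing_by
  · exact Nat.lt_succ_of_le (pvCaptureA_snd_len _ _)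
  · exact Nat.lt_succ_of_le (pvCaptureA_snd_len _ _)
  · simp

-- A's second loop (over out[1:], with seen_blocks)
def pvPass2 (items : List PvItem) (approve_dup_facts : Bool) (note_prefix : String)
    (seen : PySem.Set String) : List String :=
  match items with
  | [] => []
  | PvItem.event b :: rest =>
      let sig := PySem.Str.join "\n" b
      if PySem.Set.contains seen sig && approve_dup_facts then
        ("1 NOTE " ++ note_prefix ++ " Removed duplicate event block") ::
          pvPass2 rest approve_dup_facts note_prefix seen
      else
        b ++ pvPass2 rest approve_dup_facts note_prefix (PySem.Set.add seen sig)
  | PvItem.name b :: rest => b ++ pvPass2 rest approve_dup_facts note_prefix seen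
  | PvItem.line l :: rest => l :: pvPass2 rest approve_dup_facts note_prefix seen

def fix_indi_record_py (rec : List String) (approve_dup_facts : Bool) (approve_suffix : Bool) (note_prefix : String) : List String :=
  match rec with
  | [] => []  -- Python raises IndexError on rec[0]; excluded by Pre_
  | r0 :: rest =>
      pvNorm r0 :: pvPass2 (pvPass1 rest approve_suffix note_prefix)
        approve_dup_facts note_prefix PySem.Set.empty

-- ===== PORT B =====
-- Source B: j = next((ix for ix, x in enumerate(rest) if boundary(x)), len(rest))
def pvBoundaryIdx (xs : List String) : Nat := xs.findIdx pvBoundary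

-- Source B's single fused while loop (from i = 1 on)
def pvGo (xs : List String) (approve_dup_facts : Bool) (approve_suffix : Bool)
    (note_prefix : String) (seen : PySem.Set String) : List String :=
  match xs with
  | [] => []
  | r :: rest =>
    let line := pvNorm r
    if pvIsEvent line then
      let j := pvBoundaryIdx rest
      let block := line :: (rest.take j).map pvNorm
      let sig := PySem.Str.join "\n" block
      if PySem.Set.contains seen sig && approve_dup_facts then
        ("1 NOTE " ++ note_prefix ++ " Removed duplicate event block") ::
          pvGo (rest.drop j) approve_dup_facts approve_suffix note_prefix seen
      else
        block ++ pvGo (rest.drop j) approve_dup_facts approve_suffix note_prefix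
          (PySem.Set.add seen sig)
    else if pvIsName line then
      let j := pvBoundaryIdx rest
      let block := line :: (rest.take j).map pvNorm
      let block := if approve_suffix then pvMoveSuffix block note_prefix else block
      block ++ pvGo (rest.drop j) approve_dup_facts approve_suffix note_prefix seen
    else
      line :: pvGo rest approve_dup_facts approve_suffix note_prefix seen
termination_by xs.length
decreasing_by
  · simp
  · simp
  · simp
  · simp

def fix_indi_record_py_alt (rec : List String) (approve_dup_facts : Bool) (approve_suffix : Bool) (note_prefix : String) : List String :=
  match rec with
  | [] => []
  | r0 :: rest =>
      pvNorm r0 :: pvGo rest approve_dup_facts approve_suffix note_prefix PySem.Set.empty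

-- ===== PRECONDITION & SPEC =====
-- A raises IndexError on empty rec and ValueError when int() is applied, during block capture,
-- to a nonempty line whose first space-separated token is not int-parsable. Pre_ conservatively
-- requires every nonempty line AFTER some level-1 BIRT/DEAT/CHR/BAPM/NAME line to be parsable
-- (the exact subset of lines A parses depends on the parsed values themselves, so this excludes
-- some inputs on which A returns — see claim.json "cites").
def Pre_fix_indi_record_py (rec : List String) (approve_dup_facts : Bool) (approve_suffix : Bool) (note_prefix : String) : Prop :=
  rec ≠ [] ∧
    ∀ j < rec.length, ∀ k < rec.length,
      (1 ≤ j ∧ j < k ∧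
        (pvIsEvent (pvNorm (rec.getD j "")) || pvIsName (pvNorm (rec.getD j ""))) = true ∧
        PySem.Str.strip (rec.getD k "") ≠ "") →
      (PySem.Int.ofStr? (pvFirstTok (rec.getD k ""))).isSome = true

instance (rec : List String) (approve_dup_facts : Bool) (approve_suffix : Bool) (note_prefix : String) : Decidable (Pre_fix_indi_record_py rec approve_dup_facts approve_suffix note_prefix) := by
  unfold Pre_fix_indi_record_py; infer_instance

def pvWitness_fix_indi_record_py : List String × Bool × Bool × String :=
  (["0 @I1@ INDI", "1 SEX M"], true, true, "GEDFIX")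

def Spec_fix_indi_record_py (rec : List String) (approve_dup_facts : Bool) (approve_suffix : Bool) (note_prefix : String) (out : List String) : Prop := out = fix_indi_record_py_alt rec approve_dup_facts approve_suffix note_prefix
instance (rec : List String) (approve_dup_facts : Bool) (approve_suffix : Bool) (note_prefix : String) (out : List String) : Decidable (Spec_fix_indi_record_py rec approve_dup_facts approve_suffix note_prefix out) := by unfold Spec_fix_indi_record_py; infer_instance

-- ===== CLAIM (what is proved, stated in full; the proofs are below) =====
def Claim_equal_fix_indi_record_py : Prop := ∀ (rec : List String) (approve_dup_facts : Bool) (approve_suffix : Bool) (note_prefix : String), Dom_fix_indi_record_py rec approve_dup_facts approve_suffix note_prefix → Pre_fix_indi_record_py rec approve_dup_facts approve_suffix note_prefix → Spec_fix_indi_record_py rec approve_dup_facts approve_suffix note_prefix (fix_indi_record_py rec approve_dup_facts approve_suffix note_prefix)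

-- ===== LEMMAS AND PROOFS =====

-- A's accumulator capture equals B's boundary-index + slice form
theorem pvCaptureA_eq (xs acc : List String) :
    pvCaptureA xs acc =
      (acc.reverse ++ (xs.take (pvBoundaryIdx xs)).map pvNorm, xs.drop (pvBoundaryIdx xs)) := by
  induction xs generalizing acc with
  | nil => simp [pvCaptureA, pvBoundaryIdx]
  | cons x xs ih =>
      by_cases h : pvBoundary x = true
      · simp [pvCaptureA, pvBoundaryIdx, List.findIdx_cons, h]
      · simp only [pvCaptureA, pvBoundaryIdx, List.findIdx_cons, h,
          Bool.false_eq_true, cond_false] at *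
        simp [ih]

-- the fusion: A's second pass over A's first pass equals B's single pass
theorem pvFusion (approve_dup_facts approve_suffix : Bool) (note_prefix : String) :
    ∀ n (xs : List String), xs.length ≤ n → ∀ seen,
      pvPass2 (pvPass1 xs approve_suffix note_prefix) approve_dup_facts note_prefix seen =
        pvGo xs approve_dup_facts approve_suffix note_prefix seen := by
  intro n
  induction n with
  | zero =>
      intro xs hx seen
      have : xs = [] := List.length_eq_zero_iff.mp (Nat.le_zero.mp hx)
      subst this; simp [pvPass1, pvPass2, pvGo]
  | succ n ih =>
      intro xs hx seen
      match xs with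
      | [] => simp [pvPass1, pvPass2, pvGo]
      | r :: rest =>
        have hlen : rest.length ≤ n := by simpa using Nat.lt_succ_iff.mp (Nat.lt_of_lt_of_le (by simp) hx)
        have hdrop : (rest.drop (pvBoundaryIdx rest)).length ≤ n :=
          le_trans (by simp) hlen
        by_cases he : pvIsEvent (pvNorm r) = true
        · rw [pvPass1, pvGo]
          simp only [he, if_true, pvCaptureA_eq, List.reverse_singleton, List.singleton_append]
          rw [pvPass2]
          by_cases hc : (PySem.Set.contains seen
              (PySem.Str.join "\n" (pvNorm r :: (rest.take (pvBoundaryIdx rest)).map pvNorm))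
              && approve_dup_facts) = true
          · simp only [hc, if_true, ih _ hdrop]
          · simp only [hc, Bool.false_eq_true, if_false, ih _ hdrop]
        · by_cases hn : pvIsName (pvNorm r) = true
          · rw [pvPass1, pvGo]
            simp only [he, hn, if_false, if_true, Bool.false_eq_true,
              pvCaptureA_eq, List.reverse_singleton, List.singleton_append]
            rw [pvPass2]
            simp [ih _ hdrop]
          · rw [pvPass1, pvGo]
            simp only [he, hn, if_false, Bool.false_eq_true]
            rw [pvPass2]
            simp [ih _ hlen]

-- ===== VERDICT (by name: the statement is the Claim_ definition above) =====
theorem fix_indi_record_py_spec : Claim_equal_fix_indi_record_py := by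
  intro rec adf asx np _ _
  unfold Spec_fix_indi_record_py
  cases rec with
  | nil => rfl
  | cons r0 rest =>
      simp only [fix_indi_record_py, fix_indi_record_py_alt]
      rw [pvFusion adf asx np rest.length rest (le_refl _)]
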